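-- pv_equiv track=rewrite | github.com/rtviii/riboxyz | ribctl/lib/libseq.py | forwards_match
-- ===== SOURCE A (Python) =====
-- def forwards_match(
--     aligned_source_sequence: str, original_residue_index: int
-- ) -> int:
--     """Returns the index of a source-sequence residue in the aligned source sequence. Basically, "count forward including gaps" """
--     if original_residue_index > len(aligned_source_sequence):
--         raise IndexError( f"Passed residue with invalid index ({original_residue_index}) to back-match to target.Seqlen aligned:{len(aligned_source_sequence)}" )
--
--     original_residues_count = 0
--     for aligned_ix, char in enumerate(aligned_source_sequence):
--         if original_residues_count == original_residue_index:
--             if char == "-":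
--                 continue
--             else:
--                 return aligned_ix
--         if char == "-":
--             continue
--         else:
--             original_residues_count += 1
--
--     raise ValueError(
--         f"Residue with index {original_residue_index} not found in the aligned source sequence after full search. Logical errory, likely."
--     )
-- ===== SOURCE B (Python) =====
-- def forwards_match(
--     aligned_source_sequence: str, original_residue_index: int
-- ) -> int:
--     """Returns the index of a source-sequence residue in the aligned source sequence. Basically, "count forward including gaps" """
--     if original_residue_index > len(aligned_source_sequence):
--         raise IndexError( f"Passed residue with invalid index ({original_residue_index}) to back-match to target.Seqlen aligned:{len(aligned_source_sequence)}" )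
--
--     positions = [i for i, c in enumerate(aligned_source_sequence) if c != "-"]
--     if 0 <= original_residue_index < len(positions):
--         return positions[original_residue_index]
--
--     raise ValueError(
--         f"Residue with index {original_residue_index} not found in the aligned source sequence after full search. Logical errory, likely."
--     )
-- ===== Notes on version B (the rewrite author's own statement) =====
-- stated objective: alternative
-- what changed: Replaces the counter-based short-circuiting scan over the string with a precomputed table of non-gap aligned positions and a single direct O(1) lookup; the counter and early exit are gone.
import Mathlib
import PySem

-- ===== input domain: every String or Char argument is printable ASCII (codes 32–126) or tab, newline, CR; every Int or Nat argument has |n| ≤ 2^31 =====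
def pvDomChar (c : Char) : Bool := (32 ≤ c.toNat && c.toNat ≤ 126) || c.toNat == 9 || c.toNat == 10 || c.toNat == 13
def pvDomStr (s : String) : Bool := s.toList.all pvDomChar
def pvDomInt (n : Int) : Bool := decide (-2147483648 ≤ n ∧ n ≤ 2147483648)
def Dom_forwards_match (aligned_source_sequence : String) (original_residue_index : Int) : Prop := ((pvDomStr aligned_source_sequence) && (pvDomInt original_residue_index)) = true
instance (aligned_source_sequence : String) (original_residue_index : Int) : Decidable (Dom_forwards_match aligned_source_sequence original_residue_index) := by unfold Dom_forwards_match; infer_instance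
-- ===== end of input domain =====

-- B replaces A's counter-based short-circuiting scan with a precomputed table of
-- non-gap aligned positions and one direct lookup; equal values on Pre_ (where A returns).

-- ===== PORT A =====
-- A's enumerate loop with the running non-gap counter; none = the final ValueError.
def fmLoopA : List Char → Int → Int → Int → Option Int
  | [], _, _, _ => none
  | c :: rest, aligned_ix, cnt, target =>
    if cnt = target then
      (if c = '-' then fmLoopA rest (aligned_ix + 1) cnt target else some aligned_ix)
    else if c = '-' then fmLoopA rest (aligned_ix + 1) cnt target
    else fmLoopA rest (aligned_ix + 1) (cnt + 1) target

def forwards_match (aligned_source_sequence : String) (original_residue_index : Int) : Int :=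
  -- Python raises IndexError here; excluded by Pre_ (0 is a placeholder outside Pre_)
  if original_residue_index > PySem.Str.len aligned_source_sequence then 0
  else (fmLoopA aligned_source_sequence.toList 0 0 original_residue_index).getD 0

-- ===== PORT B =====
def forwards_match_alt (aligned_source_sequence : String) (original_residue_index : Int) : Int :=
  if original_residue_index > PySem.Str.len aligned_source_sequence then 0  -- IndexError, outside Pre_
  else
    let positions : List Int :=
      ((PySem.List.enumerate aligned_source_sequence.toList).filter (fun p => p.2 != '-')).map (fun p => p.1)
    if 0 ≤ original_residue_index ∧ original_residue_index < (positions.length : Int) then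
      (PySem.List.pyGet? positions original_residue_index).getD 0
    else 0  -- ValueError, outside Pre_

-- ===== PRECONDITION & SPEC =====
-- Pre_: exactly where Python A returns: the index names an existing non-gap residue
-- (otherwise A raises IndexError or ValueError).
def Pre_forwards_match (aligned_source_sequence : String) (original_residue_index : Int) : Prop :=
  0 ≤ original_residue_index ∧
  original_residue_index < ((aligned_source_sequence.toList.filter (fun c => c != '-')).length : Int)
instance (aligned_source_sequence : String) (original_residue_index : Int) : Decidable (Pre_forwards_match aligned_source_sequence original_residue_index) := by unfold Pre_forwards_match; infer_instance

def pvWitness_forwards_match : String × Int := ("A-BC-", 2)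

def Spec_forwards_match (aligned_source_sequence : String) (original_residue_index : Int) (out : Int) : Prop := out = forwards_match_alt aligned_source_sequence original_residue_index
instance (aligned_source_sequence : String) (original_residue_index : Int) (out : Int) : Decidable (Spec_forwards_match aligned_source_sequence original_residue_index out) := by unfold Spec_forwards_match; infer_instance

-- ===== CLAIM (what is proved, stated in full; the proofs are below) =====
def Claim_equal_forwards_match : Prop := ∀ (aligned_source_sequence : String) (original_residue_index : Int), Dom_forwards_match aligned_source_sequence original_residue_index → Pre_forwards_match aligned_source_sequence original_residue_index → Spec_forwards_match aligned_source_sequence original_residue_index (forwards_match aligned_source_sequence original_residue_index)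

-- ===== LEMMAS AND PROOFS =====

-- the list of aligned indices of non-gap characters, with the first index at `ix`
def posFrom : List Char → Int → List Int
  | [], _ => []
  | c :: rest, ix => if c = '-' then posFrom rest (ix + 1) else ix :: posFrom rest (ix + 1)

theorem posFrom_length (cs : List Char) (ix : Int) :
    (posFrom cs ix).length = (cs.filter (fun c => c != '-')).length := by
  induction cs generalizing ix with
  | nil => rfl
  | cons c rest ih =>
    by_cases h : c = '-' <;> simp [posFrom, h, ih]

theorem fmLoopA_eq_posFrom (cs : List Char) (ix cnt t : Int) (h : cnt ≤ t) :
    fmLoopA cs ix cnt t = (posFrom cs ix)[(t - cnt).toNat]? := by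
  induction cs generalizing ix cnt with
  | nil => simp [fmLoopA, posFrom]
  | cons c rest ih =>
    by_cases hc : c = '-'
    · by_cases he : cnt = t
      · subst he; simp [fmLoopA, posFrom, hc, ih _ _ (le_refl cnt)]
      · simp [fmLoopA, posFrom, hc, he, ih _ _ h]
    · by_cases he : cnt = t
      · subst he
        simp [fmLoopA, posFrom, hc]
      · have h1 : cnt + 1 ≤ t := by omega
        have h2 : (t - cnt).toNat = (t - (cnt + 1)).toNat + 1 := by omega
        simp [fmLoopA, posFrom, hc, he, ih _ _ h1, h2]

theorem enumerate_filter_eq_posFrom (cs : List Char) (s : Int) :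
    ((PySem.List.enumerate cs s).filter (fun p => p.2 != '-')).map (fun p => p.1) = posFrom cs s := by
  induction cs generalizing s with
  | nil => simp [PySem.List.enumerate_nil, posFrom]
  | cons c rest ih =>
    by_cases h : c = '-' <;>
      simp [PySem.List.enumerate_cons, posFrom, h, ih]

-- ===== VERDICT (by name: the statement is the Claim_ definition above) =====
theorem forwards_match_spec : Claim_equal_forwards_match := by
  intro s i _ hpre
  obtain ⟨h0, hlt⟩ := hpre
  have hfl : ((s.toList.filter (fun c => c != '-')).length : Int) ≤ (s.toList.length : Int) := by
    exact_mod_cast List.length_filter_le _ _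
  have hng : ¬ (i > PySem.Str.len s) := by
    simp only [PySem.Str.len_eq]
    omega
  have hpos := enumerate_filter_eq_posFrom s.toList 0
  have hlen := posFrom_length s.toList 0
  unfold Spec_forwards_match forwards_match forwards_match_alt
  rw [if_neg hng, if_neg hng]
  rw [fmLoopA_eq_posFrom _ _ _ _ h0, hpos]
  have hcond : 0 ≤ i ∧ i < ((posFrom s.toList 0).length : Int) := by
    constructor
    · exact h0
    · rw [hlen]; exact_mod_cast hlt
  rw [if_pos hcond]
  simp [PySem.List.pyGet?_of_nonneg, h0]
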